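-- pv_equiv track=rewrite | github.com/IceHe/wuwa-stat | backend/app/api/routes.py | split_tacet_combination
-- ===== SOURCE A (Python) =====
-- TACET_SINGLE_COMBOS = {
--     8: [(4, 4), (3, 4)],
--     7: [(4, 4), (4, 3), (3, 4), (3, 3)],
--     6: [(4, 4), (4, 3), (3, 4), (3, 3)],
--     5: [(3, 6), (3, 5), (2, 6), (2, 5)],
-- }
--
-- def split_tacet_combination(sola_level: int, gold_tubes: int, purple_tubes: int, claim_count: int) -> list[tuple[int, int]]:
--     if claim_count <= 1:
--         return [(gold_tubes, purple_tubes)]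
--
--     combos = TACET_SINGLE_COMBOS.get(sola_level, [])
--     matching_pairs: list[list[tuple[int, int]]] = []
--
--     for left_combo in combos:
--         for right_combo in combos:
--             if left_combo[0] + right_combo[0] == gold_tubes and left_combo[1] + right_combo[1] == purple_tubes:
--                 ordered_pair = sorted([left_combo, right_combo], reverse=True)
--                 matching_pairs.append(ordered_pair)
--
--     if not matching_pairs:
--         return [(gold_tubes, purple_tubes)]
--
--     matching_pairs.sort(reverse=True)
--     return matching_pairs[0]
-- ===== SOURCE B (Python) =====
-- TACET_SINGLE_COMBOS = {
--     8: [(4, 4), (3, 4)],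
--     7: [(4, 4), (4, 3), (3, 4), (3, 3)],
--     6: [(4, 4), (4, 3), (3, 4), (3, 3)],
--     5: [(3, 6), (3, 5), (2, 6), (2, 5)],
-- }
--
-- def split_tacet_combination(sola_level: int, gold_tubes: int, purple_tubes: int, claim_count: int) -> list[tuple[int, int]]:
--     if claim_count <= 1:
--         return [(gold_tubes, purple_tubes)]
--
--     combos = TACET_SINGLE_COMBOS.get(sola_level, [])
--     combo_set = set(combos)
--     best: list[tuple[int, int]] | None = None
--
--     for left in combos:
--         complement = (gold_tubes - left[0], purple_tubes - left[1])
--         if complement in combo_set: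
--             pair = [left, complement] if left >= complement else [complement, left]
--             if best is None or pair > best:
--                 best = pair
--
--     return best if best is not None else [(gold_tubes, purple_tubes)]
-- ===== Notes on version B (the rewrite author's own statement) =====
-- stated objective: simpler
-- what changed: Replaced the nested double scan over all combo pairs plus collecting every match and sorting them with a single pass over the combos that looks up the complement (gold-left[0], purple-left[1]) in a set and keeps a running best ordered pair.
import Mathlib
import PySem

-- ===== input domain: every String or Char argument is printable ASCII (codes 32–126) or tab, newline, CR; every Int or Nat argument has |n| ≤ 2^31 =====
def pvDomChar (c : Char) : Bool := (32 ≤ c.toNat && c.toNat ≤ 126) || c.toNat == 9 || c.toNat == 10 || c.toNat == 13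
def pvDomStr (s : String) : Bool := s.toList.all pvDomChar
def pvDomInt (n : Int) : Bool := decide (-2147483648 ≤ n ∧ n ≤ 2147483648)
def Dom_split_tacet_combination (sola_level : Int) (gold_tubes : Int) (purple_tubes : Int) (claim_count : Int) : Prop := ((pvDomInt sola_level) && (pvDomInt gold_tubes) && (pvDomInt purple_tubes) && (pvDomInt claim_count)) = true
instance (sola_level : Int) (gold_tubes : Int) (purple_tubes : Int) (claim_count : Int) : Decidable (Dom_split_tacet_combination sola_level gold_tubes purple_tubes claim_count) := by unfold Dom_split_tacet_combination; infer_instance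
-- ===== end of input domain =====

-- B replaces A's nested double scan + collect-all + sort with a single pass over the
-- combos using a set complement lookup and a running best pair (objective: simpler).

-- TACET_SINGLE_COMBOS (module constant, shared by both Pythons)
def pvTacetCombos : PySem.Dict Int (List (Int × Int)) :=
  PySem.Dict.ofList
    [(8, [(4,4),(3,4)]),
     (7, [(4,4),(4,3),(3,4),(3,3)]),
     (6, [(4,4),(4,3),(3,4),(3,3)]),
     (5, [(3,6),(3,5),(2,6),(2,5)])]

-- Python's '<' on int 2-tuples (lexicographic); hand-written, exact on int pairs
def pvTupLt (a b : Int × Int) : Bool := a.1 < b.1 || (a.1 == b.1 && a.2 < b.2)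

-- Python's '<' on lists of int 2-tuples (lexicographic); hand-written, exact here
def pvPairLt : List (Int × Int) → List (Int × Int) → Bool
  | [], [] => false
  | [], _ :: _ => true
  | _ :: _, [] => false
  | a :: xs, b :: ys => pvTupLt a b || (a == b && pvPairLt xs ys)

-- ===== PORT A =====
-- matching_pairs.sort(reverse=True): stable descending insertion sort under
-- Python list comparison (hand-ported; exact on these lists of int pairs)
def pvInsertDesc (x : List (Int × Int)) : List (List (Int × Int)) → List (List (Int × Int))
  | [] => [x]
  | y :: ys => if pvPairLt y x then x :: y :: ys else y :: pvInsertDesc x ys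

def pvSortDesc (l : List (List (Int × Int))) : List (List (Int × Int)) :=
  l.foldl (fun acc x => pvInsertDesc x acc) []

-- body of A after the claim_count guard (claim_count no longer occurs)
def pvAbody (sola g p : Int) : List (Int × Int) :=
  let combos := pvTacetCombos.getD sola []
  let matching := combos.foldl (fun acc l =>
    combos.foldl (fun acc r =>
      if l.1 + r.1 = g ∧ l.2 + r.2 = p then
        acc ++ [PySem.List.sorted2 [l, r] Prod.fst Prod.snd true]
      else acc) acc) []
  if matching = [] then [(g, p)]
  -- matching_pairs[0]: guarded by the emptiness test above, so pyGet? is some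
  else (PySem.List.pyGet? (pvSortDesc matching) 0).getD []

def split_tacet_combination (sola_level : Int) (gold_tubes : Int) (purple_tubes : Int) (claim_count : Int) : List (Int × Int) :=
  if claim_count ≤ 1 then [(gold_tubes, purple_tubes)]
  else pvAbody sola_level gold_tubes purple_tubes

-- ===== PORT B =====
-- body of B after the claim_count guard (claim_count no longer occurs)
def pvBbody (sola g p : Int) : List (Int × Int) :=
  let combos := pvTacetCombos.getD sola []
  let comboSet := PySem.Set.ofList combos
  let best := combos.foldl (fun (best : Option (List (Int × Int))) l =>
    let comp := (g - l.1, p - l.2)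
    if comp ∈ comboSet then
      -- 'left >= complement' is Python tuple lex ≥, i.e. not <
      let pair := if !pvTupLt l comp then [l, comp] else [comp, l]
      match best with
      | none => some pair
      | some b => if pvPairLt b pair then some pair else some b   -- 'pair > best'
    else best) none
  match best with
  | some b => b
  | none => [(g, p)]

def split_tacet_combination_alt (sola_level : Int) (gold_tubes : Int) (purple_tubes : Int) (claim_count : Int) : List (Int × Int) :=
  if claim_count ≤ 1 then [(gold_tubes, purple_tubes)]
  else pvBbody sola_level gold_tubes purple_tubes

-- ===== PRECONDITION & SPEC =====
def Spec_split_tacet_combination (sola_level : Int) (gold_tubes : Int) (purple_tubes : Int) (claim_count : Int) (out : List (Int × Int)) : Prop := out = split_tacet_combination_alt sola_level gold_tubes purple_tubes claim_count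
instance (sola_level : Int) (gold_tubes : Int) (purple_tubes : Int) (claim_count : Int) (out : List (Int × Int)) : Decidable (Spec_split_tacet_combination sola_level gold_tubes purple_tubes claim_count out) := by unfold Spec_split_tacet_combination; infer_instance

-- ===== CLAIM (what is proved, stated in full; the proofs are below) =====
def Claim_equal_split_tacet_combination : Prop := ∀ (sola_level : Int) (gold_tubes : Int) (purple_tubes : Int) (claim_count : Int), Dom_split_tacet_combination sola_level gold_tubes purple_tubes claim_count → Spec_split_tacet_combination sola_level gold_tubes purple_tubes claim_count (split_tacet_combination sola_level gold_tubes purple_tubes claim_count)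

-- ===== LEMMAS AND PROOFS =====

-- the running-best step of B's loop
def pvStep (b : Option (List (Int × Int))) (x : List (Int × Int)) : Option (List (Int × Int)) :=
  match b with
  | none => some x
  | some y => if pvPairLt y x then some x else some y

theorem pvHead_insertDesc (x : List (Int × Int)) (acc : List (List (Int × Int))) :
    (pvInsertDesc x acc).head? = pvStep acc.head? x := by
  cases acc with
  | nil => rfl
  | cons y ys =>
    simp only [pvInsertDesc, pvStep, List.head?]
    split_ifs <;> rfl

theorem pvHead_foldl_insert (cs : List (List (Int × Int))) :
    ∀ acc, (cs.foldl (fun a x => pvInsertDesc x a) acc).head? = cs.foldl pvStep acc.head? := by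
  induction cs with
  | nil => intro acc; rfl
  | cons c cs ih =>
    intro acc
    simp only [List.foldl, ih, pvHead_insertDesc]

theorem pvHead_sortDesc (cs : List (List (Int × Int))) :
    (pvSortDesc cs).head? = cs.foldl pvStep none := by
  simpa using pvHead_foldl_insert cs []

theorem pvStep_some (t : List (List (Int × Int))) :
    ∀ y, ∃ z, t.foldl pvStep (some y) = some z := by
  induction t with
  | nil => intro y; exact ⟨y, rfl⟩
  | cons x t ih =>
    intro y
    simp only [List.foldl, pvStep]
    split_ifs <;> exact ih _

theorem pvCond_iff (l r : Int × Int) (g p : Int) :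
    (l.1 + r.1 = g ∧ l.2 + r.2 = p) ↔ r = (g - l.1, p - l.2) := by
  rcases r with ⟨a, b⟩
  simp only [Prod.mk.injEq]
  omega

theorem pvInner_noMatch (l : Int × Int) (g p : Int) (f : Int × Int → List (Int × Int))
    (cs : List (Int × Int)) :
    ∀ acc, (g - l.1, p - l.2) ∉ cs →
      cs.foldl (fun acc r => if l.1 + r.1 = g ∧ l.2 + r.2 = p then acc ++ [f r] else acc) acc = acc := by
  induction cs with
  | nil => intro acc _; rfl
  | cons r cs ih =>
    intro acc h
    simp only [List.mem_cons, not_or] at h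
    simp only [List.foldl, if_neg (fun hc => h.1 ((pvCond_iff l r g p).mp hc).symm)]
    exact ih acc h.2

theorem pvInner_fold (l : Int × Int) (g p : Int) (f : Int × Int → List (Int × Int))
    (cs : List (Int × Int)) :
    ∀ acc, cs.Nodup →
      cs.foldl (fun acc r => if l.1 + r.1 = g ∧ l.2 + r.2 = p then acc ++ [f r] else acc) acc
        = acc ++ (if (g - l.1, p - l.2) ∈ cs then [f (g - l.1, p - l.2)] else []) := by
  induction cs with
  | nil => intro acc _; simp
  | cons r cs ih =>
    intro acc hnd
    rcases List.nodup_cons.mp hnd with ⟨hr, hnd'⟩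
    by_cases hc : r = (g - l.1, p - l.2)
    · subst hc
      simp only [List.foldl, if_pos ((pvCond_iff l r g p).mpr rfl)]
      rw [pvInner_noMatch l g p f cs _ hr]
      simp
    · simp only [List.foldl, if_neg (fun h => hc ((pvCond_iff l r g p).mp h))]
      rw [ih acc hnd']
      have hmem : ((g - l.1, p - l.2) ∈ r :: cs) ↔ ((g - l.1, p - l.2) ∈ cs) := by
        constructor
        · intro h
          rcases List.mem_cons.mp h with h | h
          · exact absurd h.symm hc
          · exact h
        · exact List.mem_cons_of_mem r
      simp [hmem]

theorem pvOuter_fold (g p : Int) (f : Int × Int → Int × Int → List (Int × Int))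
    (cs : List (Int × Int)) (hnd : cs.Nodup) (os : List (Int × Int)) :
    ∀ acc, os.foldl (fun acc l =>
        cs.foldl (fun acc r => if l.1 + r.1 = g ∧ l.2 + r.2 = p then acc ++ [f l r] else acc) acc) acc
      = acc ++ (os.filter (fun l => decide ((g - l.1, p - l.2) ∈ cs))).map
                 (fun l => f l (g - l.1, p - l.2)) := by
  induction os with
  | nil => intro acc; simp
  | cons l os ih =>
    intro acc
    simp only [List.foldl, List.filter]
    rw [pvInner_fold l g p (f l) cs acc hnd]
    by_cases hm : (g - l.1, p - l.2) ∈ cs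
    · simp only [if_pos hm, decide_eq_true hm, ih]
      simp
    · simp only [if_neg hm, decide_eq_false hm, ih]
      simp

-- Python's sorted([l, r], reverse=True) on two int pairs
theorem pvSorted2_pair (a b : Int × Int) :
    PySem.List.sorted2 [a, b] Prod.fst Prod.snd true = if pvTupLt a b then [b, a] else [a, b] := by
  rcases a with ⟨a1, a2⟩
  rcases b with ⟨b1, b2⟩
  simp only [PySem.List.sorted2, PySem.List.insertBy, pvTupLt, List.foldl]
  split_ifs <;> simp_all <;> omega

theorem pvB_fold (g p : Int) (cs : List (Int × Int)) (os : List (Int × Int)) :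
    ∀ b : Option (List (Int × Int)),
      os.foldl (fun best l =>
        if (g - l.1, p - l.2) ∈ PySem.Set.ofList cs then
          match best with
          | none => some (if !pvTupLt l (g - l.1, p - l.2) then [l, (g - l.1, p - l.2)] else [(g - l.1, p - l.2), l])
          | some b' => if pvPairLt b' (if !pvTupLt l (g - l.1, p - l.2) then [l, (g - l.1, p - l.2)] else [(g - l.1, p - l.2), l])
                       then some (if !pvTupLt l (g - l.1, p - l.2) then [l, (g - l.1, p - l.2)] else [(g - l.1, p - l.2), l])
                       else some b'
        else best) b
      = ((os.filter (fun l => decide ((g - l.1, p - l.2) ∈ cs))).map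
          (fun l => if !pvTupLt l (g - l.1, p - l.2) then [l, (g - l.1, p - l.2)] else [(g - l.1, p - l.2), l])).foldl pvStep b := by
  induction os with
  | nil => intro b; rfl
  | cons l os ih =>
    intro b
    simp only [List.foldl, List.filter]
    by_cases hm : (g - l.1, p - l.2) ∈ cs
    · rw [if_pos ((PySem.Set.mem_ofList cs _).mpr hm), decide_eq_true hm]
      simp only [List.map, List.foldl, ih, pvStep]
    · rw [if_neg (fun h => hm ((PySem.Set.mem_ofList cs _).mp h)), decide_eq_false hm]
      exact ih b

theorem pvCombos_cases (sola : Int) :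
    pvTacetCombos.getD sola [] = [(4,4),(3,4)] ∨
    pvTacetCombos.getD sola [] = [(4,4),(4,3),(3,4),(3,3)] ∨
    pvTacetCombos.getD sola [] = [(3,6),(3,5),(2,6),(2,5)] ∨
    pvTacetCombos.getD sola [] = [] := by
  by_cases h8 : sola = 8
  · subst h8; left; decide
  by_cases h7 : sola = 7
  · subst h7; right; left; decide
  by_cases h6 : sola = 6
  · subst h6; right; left; decide
  by_cases h5 : sola = 5
  · subst h5; right; right; left; decide
  right; right; right
  have hmk : pvTacetCombos = PySem.Dict.mk
      [(8, [(4,4),(3,4)]), (7, [(4,4),(4,3),(3,4),(3,3)]),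
       (6, [(4,4),(4,3),(3,4),(3,3)]), (5, [(3,6),(3,5),(2,6),(2,5)])] := by decide
  rw [hmk, PySem.Dict.getD_eq_get?_getD]
  simp only [PySem.Dict.get?_mk_cons, beq_iff_eq,
    if_neg (Ne.symm h8), if_neg (Ne.symm h7), if_neg (Ne.symm h6), if_neg (Ne.symm h5)]
  rfl

theorem pvCombos_nodup (sola : Int) : (pvTacetCombos.getD sola []).Nodup := by
  rcases pvCombos_cases sola with h | h | h | h <;> rw [h] <;> decide

theorem pvBody_eq (sola g p : Int) : pvAbody sola g p = pvBbody sola g p := by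
  have hnd := pvCombos_nodup sola
  unfold pvAbody pvBbody
  dsimp only []
  generalize pvTacetCombos.getD sola [] = cs at hnd ⊢
  rw [pvOuter_fold g p (fun l r => PySem.List.sorted2 [l, r] Prod.fst Prod.snd true) cs
      hnd cs, pvB_fold g p cs cs]
  simp only [List.nil_append]
  have hmapeq :
      (cs.filter (fun l => decide ((g - l.1, p - l.2) ∈ cs))).map
          (fun l => PySem.List.sorted2 [l, (g - l.1, p - l.2)] Prod.fst Prod.snd true)
        = (cs.filter (fun l => decide ((g - l.1, p - l.2) ∈ cs))).map
          (fun l => if !pvTupLt l (g - l.1, p - l.2) then [l, (g - l.1, p - l.2)] else [(g - l.1, p - l.2), l]) := by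
    apply List.map_congr_left
    intro l _
    rw [pvSorted2_pair]
    cases h : pvTupLt l (g - l.1, p - l.2) <;> simp [h]
  rw [hmapeq]
  cases hL : (cs.filter (fun l => decide ((g - l.1, p - l.2) ∈ cs))).map
      (fun l => if !pvTupLt l (g - l.1, p - l.2) then [l, (g - l.1, p - l.2)] else [(g - l.1, p - l.2), l]) with
  | nil => simp
  | cons b t =>
    have hne : (b :: t : List (List (Int × Int))) ≠ [] := by simp
    rw [if_neg hne]
    obtain ⟨z, hz⟩ := pvStep_some t b
    have hfold : (b :: t).foldl pvStep none = some z := by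
      simp only [List.foldl, pvStep]; exact hz
    rw [PySem.List.pyGet?_zero, ← List.head?_eq_getElem?, pvHead_sortDesc, hfold]
    rfl

-- ===== VERDICT (by name: the statement is the Claim_ definition above) =====
theorem split_tacet_combination_spec : Claim_equal_split_tacet_combination := by
  intro sola g p c _
  unfold Spec_split_tacet_combination split_tacet_combination split_tacet_combination_alt
  by_cases h : c ≤ 1
  · rw [if_pos h, if_pos h]
  · simp [h, pvBody_eq]
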